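-- pv_equiv track=rewrite | github.com/Tony-A-Michailidis/K8SAI | k8sai/log_collector.py | _determine_log_level
-- ===== SOURCE A (Python) =====
-- def _determine_log_level(message: str) -> str:
--     """Determine log level from message content"""
--     message_lower = message.lower()
--
--     if any(keyword in message_lower for keyword in ['error', 'failed', 'exception', 'panic', 'fatal']):
--         return 'ERROR'
--     elif any(keyword in message_lower for keyword in ['warn', 'warning']):
--         return 'WARN'
--     elif any(keyword in message_lower for keyword in ['debug', 'trace']):
--         return 'DEBUG'
--     else:
--         return 'INFO'
-- ===== SOURCE B (Python) =====
-- # Single left-to-right positional scan: at each index check which keywords start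
-- # there (startswith), keeping the minimum priority seen; no substring search built-in.
-- _KW = {'error': 0, 'failed': 0, 'exception': 0, 'panic': 0, 'fatal': 0,
--        'warn': 1, 'warning': 1, 'debug': 2, 'trace': 2}
-- _LEVELS = ['ERROR', 'WARN', 'DEBUG', 'INFO']
--
-- def _determine_log_level(message: str) -> str:
--     ml = message.lower()
--     best = 3
--     for i in range(len(ml)):
--         for kw, pr in _KW.items():
--             if pr < best and ml.startswith(kw, i):
--                 best = pr
--     return _LEVELS[best]
-- ===== Notes on version B (the rewrite author's own statement) =====
-- stated objective: alternative
-- what changed: Replaces the if/elif chain of per-keyword substring searches with a single left-to-right positional scan that tests startswith for each keyword at every index while maintaining a minimum-priority accumulator, then indexes a level table.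
import Mathlib
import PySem

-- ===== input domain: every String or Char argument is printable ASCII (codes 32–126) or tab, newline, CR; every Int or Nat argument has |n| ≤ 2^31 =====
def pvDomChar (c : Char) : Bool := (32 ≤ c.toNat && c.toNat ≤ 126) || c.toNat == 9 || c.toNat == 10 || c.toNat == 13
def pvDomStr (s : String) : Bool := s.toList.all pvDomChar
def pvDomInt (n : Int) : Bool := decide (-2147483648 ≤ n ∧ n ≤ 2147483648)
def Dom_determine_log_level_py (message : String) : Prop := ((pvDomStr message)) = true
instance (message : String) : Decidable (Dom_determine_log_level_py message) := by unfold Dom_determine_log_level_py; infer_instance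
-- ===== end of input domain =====

-- B replaces A's if/elif chain of substring ('in') tests by one positional scan with a
-- minimum-priority accumulator and a level table (alternative decomposition, same cost).

-- ===== PORT A =====
def determine_log_level_py (message : String) : String :=
  let message_lower := PySem.Str.lower message
  if ["error", "failed", "exception", "panic", "fatal"].any (fun k => PySem.Str.isIn k message_lower) then "ERROR"
  else if ["warn", "warning"].any (fun k => PySem.Str.isIn k message_lower) then "WARN"
  else if ["debug", "trace"].any (fun k => PySem.Str.isIn k message_lower) then "DEBUG"
  else "INFO"

-- ===== PORT B =====
-- the dict _KW as an association list (keyword as char list, priority)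
def pvKw : List (List Char × Nat) :=
  [("error".toList, 0), ("failed".toList, 0), ("exception".toList, 0), ("panic".toList, 0),
   ("fatal".toList, 0), ("warn".toList, 1), ("warning".toList, 1), ("debug".toList, 2),
   ("trace".toList, 2)]

def pvLevels : List String := ["ERROR", "WARN", "DEBUG", "INFO"]

-- ml.startswith(kw, i) with 0 ≤ i ≤ len(ml) is exactly 'kw is a prefix of ml[i:]'
def pvStep (ml : List Char) (i : Nat) (b : Nat) (kv : List Char × Nat) : Nat :=
  if kv.2 < b && PySem.Chars.startswith (ml.drop i) kv.1 then kv.2 else b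

def determine_log_level_py_alt (message : String) : String :=
  let ml := (PySem.Str.lower message).toList
  let best := (List.range ml.length).foldl (fun b i => pvKw.foldl (pvStep ml i) b) 3
  pvLevels.getD best "INFO"   -- _LEVELS[best]; best < 4 always, so plain list indexing

-- ===== PRECONDITION & SPEC =====
def Spec_determine_log_level_py (message : String) (out : String) : Prop := out = determine_log_level_py_alt message
instance (message : String) (out : String) : Decidable (Spec_determine_log_level_py message out) := by unfold Spec_determine_log_level_py; infer_instance

-- ===== CLAIM (what is proved, stated in full; the proofs are below) =====
def Claim_equal_determine_log_level_py : Prop := ∀ (message : String), Dom_determine_log_level_py message → Spec_determine_log_level_py message (determine_log_level_py message)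

-- ===== LEMMAS AND PROOFS =====

-- keyword groups, list-side
def pvErrK : List (List Char) := ["error".toList, "failed".toList, "exception".toList, "panic".toList, "fatal".toList]
def pvWarnK : List (List Char) := ["warn".toList, "warning".toList]
def pvDbgK : List (List Char) := ["debug".toList, "trace".toList]

-- does some keyword of group g start at position i of ml?
def pvHit (ml : List Char) (g : List (List Char)) (i : Nat) : Bool :=
  g.any (fun k => PySem.Chars.startswith (ml.drop i) k)

-- minimum priority matched at position i (3 = none)
def pvAt (ml : List Char) (i : Nat) : Nat :=
  if pvHit ml pvErrK i then 0 else if pvHit ml pvWarnK i then 1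
  else if pvHit ml pvDbgK i then 2 else 3

-- fold of pvStep over one same-priority keyword group
theorem pv_gfold (ml : List Char) (i : Nat) (g : List (List Char)) (p : Nat) (b : Nat) :
    (g.map (fun k => (k, p))).foldl (pvStep ml i) b
      = if p < b && pvHit ml g i then p else b := by
  induction g generalizing b with
  | nil => simp [pvHit]
  | cons k t ih =>
      simp only [List.map_cons, List.foldl_cons, ih, pvStep, pvHit, List.any_cons]
      by_cases hs : PySem.Chars.startswith (ml.drop i) k = true <;>
        by_cases hp : p < b <;> simp_all <;> (try split_ifs) <;> omega

-- the inner fold over the keyword dict is a min against pvAt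
theorem pv_inner (ml : List Char) (i : Nat) (b : Nat) (hb : b ≤ 3) :
    pvKw.foldl (pvStep ml i) b = min b (pvAt ml i) := by
  have hsplit : pvKw = pvErrK.map (fun k => (k, 0)) ++ pvWarnK.map (fun k => (k, 1))
      ++ pvDbgK.map (fun k => (k, 2)) := by rfl
  rw [hsplit, List.foldl_append, List.foldl_append, pv_gfold, pv_gfold, pv_gfold]
  unfold pvAt
  cases hE : pvHit ml pvErrK i <;> cases hW : pvHit ml pvWarnK i <;>
    cases hD : pvHit ml pvDbgK i <;> simp [hb] <;> (try split_ifs) <;> omega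

-- the outer fold over positions computes the nested-if of the group 'any's
theorem pv_outer (ml : List Char) (l : List Nat) (b : Nat) (hb : b ≤ 3) :
    l.foldl (fun b i => pvKw.foldl (pvStep ml i) b) b =
      min b (if l.any (pvHit ml pvErrK) then 0 else if l.any (pvHit ml pvWarnK) then 1
             else if l.any (pvHit ml pvDbgK) then 2 else 3) := by
  induction l generalizing b with
  | nil => simp; omega
  | cons i t ih =>
      simp only [List.foldl_cons, List.any_cons, Bool.or_eq_true]
      rw [pv_inner ml i b hb, ih (min b (pvAt ml i)) (by unfold pvAt; split_ifs <;> omega)]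
      unfold pvAt
      cases hE : pvHit ml pvErrK i <;> cases hW : pvHit ml pvWarnK i <;>
      cases hD : pvHit ml pvDbgK i <;> simp_all <;> split_ifs <;> omega

-- a nonempty keyword is 'in' ml iff it starts at some position i < ml.length
theorem pv_isIn_iff (ml k : List Char) (hk : k ≠ []) :
    PySem.Chars.isIn k ml = (List.range ml.length).any
      (fun i => PySem.Chars.startswith (ml.drop i) k) := by
  rcases h : (List.range ml.length).any (fun i => PySem.Chars.startswith (ml.drop i) k) with _ | _
  · simp only [List.any_eq_false, List.mem_range] at h
    rcases hin : PySem.Chars.isIn k ml with _ | _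
    · rfl
    · exfalso
      obtain ⟨j, hj⟩ := (PySem.Chars.exists_prefix_drop_iff_isIn k ml).2 hin
      by_cases hjl : j < ml.length
      · exact absurd ((PySem.Chars.startswith_iff _ _).2 hj) (by simp [h j hjl])
      · rw [List.drop_eq_nil_of_le (by omega)] at hj
        exact hk (List.prefix_nil.1 hj)
  · simp only [List.any_eq_true, List.mem_range] at h
    obtain ⟨i, _, hs⟩ := h
    exact (PySem.Chars.exists_prefix_drop_iff_isIn k ml).1
      ⟨i, (PySem.Chars.startswith_iff _ _).1 hs⟩

-- group 'any over keywords of isIn' = 'any over positions of pvHit'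
theorem pv_group (ml : List Char) (g : List (List Char)) (hg : ∀ k ∈ g, k ≠ []) :
    g.any (fun k => PySem.Chars.isIn k ml) =
      (List.range ml.length).any (pvHit ml g) := by
  rw [Bool.eq_iff_iff]
  simp only [List.any_eq_true, List.mem_range, pvHit]
  constructor
  · rintro ⟨k, hkg, hk⟩
    rw [pv_isIn_iff ml k (hg k hkg)] at hk
    simp only [List.any_eq_true, List.mem_range] at hk
    obtain ⟨i, hi, hs⟩ := hk
    exact ⟨i, hi, k, hkg, hs⟩
  · rintro ⟨i, hi, k, hkg, hs⟩
    refine ⟨k, hkg, ?_⟩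
    rw [pv_isIn_iff ml k (hg k hkg)]
    simp only [List.any_eq_true, List.mem_range]
    exact ⟨i, hi, hs⟩

-- ===== VERDICT (by name: the statement is the Claim_ definition above) =====
theorem determine_log_level_py_spec : Claim_equal_determine_log_level_py := by
  intro message _
  show determine_log_level_py message = determine_log_level_py_alt message
  unfold determine_log_level_py determine_log_level_py_alt
  simp only [PySem.Str.isIn_eq, PySem.Str.toList_lower]
  rw [pv_outer _ _ 3 le_rfl]
  have hE := pv_group (PySem.Chars.lower message.toList) pvErrK (by decide)
  have hW := pv_group (PySem.Chars.lower message.toList) pvWarnK (by decide)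
  have hD := pv_group (PySem.Chars.lower message.toList) pvDbgK (by decide)
  simp only [pvErrK, pvWarnK, pvDbgK, List.any_cons, List.any_nil] at hE hW hD ⊢
  simp only [hE, hW, hD]
  split_ifs <;> simp [pvLevels]
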